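-- pv_equiv track=rewrite | github.com/reversebutterfly/sam2-pre-new | scripts/run_vadi_v5.py | _post_clean_to_proc
-- ===== SOURCE A (Python) =====
-- from typing import Any, Callable, Dict, Iterable, List, Optional, Sequence, Tuple
--
-- def _post_clean_to_proc(
--     post_insert_clean: Sequence[int], W: Sequence[int], T_proc: int,
-- ) -> List[int]:
--     """Map post-insert clean-space indices to processed-space.
--
--     For a clean frame at clean index c, its processed index is c +
--     (number of inserts at processed positions ≤ c + k). Use the
--     inverse: for a post-insert processed index a, clean idx = a −
--     (number of W entries < a).
--     """
--     # Since post_insert_clean is already in clean-space, and we want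
--     # back in processed-space, compute processed_idx = clean_idx +
--     # (# inserts at processed-idx < processed_idx).
--     # Simpler: iterate post_insert clean → find processed such that
--     # that processed idx is NOT in W AND maps back to clean c.
--     W_sorted = sorted(int(w) for w in W)
--     out: List[int] = []
--     for c in post_insert_clean:
--         c_int = int(c)
--         # processed_idx = c + (# W entries ≤ the final processed_idx - 1)
--         # Which is equivalent to c_int + (# W entries ≤ final processed_idx).
--         # This is a self-referential equation; solve by iteration.
--         p = c_int
--         while True:
--             shift = sum(1 for w in W_sorted if w <= p)
--             new_p = c_int + shift
--             if new_p == p: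
--                 break
--             p = new_p
--         if p < T_proc and p not in set(W_sorted):
--             out.append(p)
--     return sorted(set(out))
-- ===== SOURCE B (Python) =====
-- from typing import List, Sequence
--
--
-- def _post_clean_to_proc(
--     post_insert_clean: Sequence[int], W: Sequence[int], T_proc: int,
-- ) -> List[int]:
--     # One merged sweep: sort W once, sort the distinct clean indices, and walk
--     # both with a single shared pointer j (the processed index of clean c is
--     # c + j where j is the first position with Ws[j] > c + j; previously
--     # consumed positions stay consumed as c grows).  Output comes out already
--     # sorted and distinct, so no final sorted(set(...)) pass is needed.
--     Ws = sorted(int(w) for w in W)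
--     in_W = set(Ws)
--     n = len(Ws)
--     out: List[int] = []
--     j = 0
--     for c in sorted({int(x) for x in post_insert_clean}):
--         while j < n and Ws[j] <= c + j:
--             j += 1
--         p = c + j
--         if p < T_proc and p not in in_W:
--             out.append(p)
--     return out
-- ===== Notes on version B (the rewrite author's own statement) =====
-- stated objective: faster
-- what changed: A solves a self-referential shift equation per element by fixed-point iteration, re-counting all of W and rebuilding set(W) on every pass; B sorts W once, builds the membership set once, sorts the distinct clean indices, and computes every processed index in one merged sweep with a single shared pointer over sorted W, emitting the output already sorted and distinct.
import Mathlib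
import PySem

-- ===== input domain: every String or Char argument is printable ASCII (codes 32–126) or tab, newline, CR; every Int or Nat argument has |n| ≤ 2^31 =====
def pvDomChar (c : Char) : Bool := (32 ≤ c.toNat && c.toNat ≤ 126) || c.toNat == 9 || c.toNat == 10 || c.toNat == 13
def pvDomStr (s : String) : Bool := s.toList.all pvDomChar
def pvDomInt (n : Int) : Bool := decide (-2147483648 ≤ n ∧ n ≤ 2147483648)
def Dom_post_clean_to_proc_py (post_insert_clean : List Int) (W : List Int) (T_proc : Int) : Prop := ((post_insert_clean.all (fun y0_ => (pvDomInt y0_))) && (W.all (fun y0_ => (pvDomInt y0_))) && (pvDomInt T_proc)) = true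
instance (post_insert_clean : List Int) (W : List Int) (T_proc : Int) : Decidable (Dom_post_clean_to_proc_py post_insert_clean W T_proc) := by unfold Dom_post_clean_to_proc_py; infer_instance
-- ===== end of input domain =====

-- ===== PORT A =====
-- B replaces A's per-element fixed-point iteration (repeated full counts over W) by one
-- sorted merged sweep with a shared pointer; equivalence of the return values is proved below.

-- sum(1 for w in W_sorted if w <= p)
def aShift (Ws : List Int) (p : Int) : Int :=
  Ws.foldl (fun acc w => if w ≤ p then acc + 1 else acc) 0

-- A's `while True` fixed-point loop; the fuel argument only makes it total
-- (Ws.length + 1 iterations always suffice, proved in aFix_eq below).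
def aFix (Ws : List Int) (c : Int) : Nat → Int → Int
  | 0, p => p
  | fuel + 1, p =>
    let newP := c + aShift Ws p
    if newP = p then p else aFix Ws c fuel newP

-- body of A's `for c in post_insert_clean` loop
def aStep (Ws inW : List Int) (T_proc : Int) (out : List Int) (c : Int) : List Int :=
  let p := aFix Ws c (Ws.length + 1) c
  if p < T_proc && !(inW.contains p) then out ++ [p] else out

def post_clean_to_proc_py (post_insert_clean : List Int) (W : List Int) (T_proc : Int) : List Int :=
  let wSorted := PySem.List.sorted W (fun x => x)
  let out := post_insert_clean.foldl (aStep wSorted (PySem.Set.ofList wSorted) T_proc) []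
  PySem.List.sorted (PySem.Set.ofList out) (fun x => x)

-- ===== PORT B =====
-- the `while j < n and Ws[j] <= c + j: j += 1` sweep, walking the unseen suffix of Ws
def bAdv (c : Int) : List Int → Nat → List Int × Nat
  | [], j => ([], j)
  | w :: ws, j => if w ≤ c + (j : Int) then bAdv c ws (j + 1) else (w :: ws, j)

-- one iteration of B's `for c in sorted({...})` loop: state = (unseen suffix of Ws, j, out)
def bStep (inW : List Int) (T_proc : Int) (st : List Int × Nat × List Int) (c : Int) :
    List Int × Nat × List Int :=
  let r := bAdv c st.1 st.2.1
  let p := c + (r.2 : Int)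
  (r.1, r.2, if p < T_proc && !(inW.contains p) then st.2.2 ++ [p] else st.2.2)

def post_clean_to_proc_py_alt (post_insert_clean : List Int) (W : List Int) (T_proc : Int) : List Int :=
  let ws := PySem.List.sorted W (fun x => x)
  let inW := PySem.Set.ofList ws
  let cs := PySem.List.sorted (PySem.Set.ofList post_insert_clean) (fun x => x)
  (cs.foldl (bStep inW T_proc) (ws, 0, [])).2.2

-- ===== PRECONDITION & SPEC =====
def Spec_post_clean_to_proc_py (post_insert_clean : List Int) (W : List Int) (T_proc : Int) (out : List Int) : Prop := out = post_clean_to_proc_py_alt post_insert_clean W T_proc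
instance (post_insert_clean : List Int) (W : List Int) (T_proc : Int) (out : List Int) : Decidable (Spec_post_clean_to_proc_py post_insert_clean W T_proc out) := by unfold Spec_post_clean_to_proc_py; infer_instance

-- ===== CLAIM (what is proved, stated in full; the proofs are below) =====
def Claim_equal_post_clean_to_proc_py : Prop := ∀ (post_insert_clean : List Int) (W : List Int) (T_proc : Int), Dom_post_clean_to_proc_py post_insert_clean W T_proc → Spec_post_clean_to_proc_py post_insert_clean W T_proc (post_clean_to_proc_py post_insert_clean W T_proc)

-- ===== LEMMAS AND PROOFS =====

-- the processed index B assigns to clean index c (used only in the proofs)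
def fIdx (Ws : List Int) (c : Int) : Int := c + ((bAdv c Ws 0).2 : Int)

-- the scan splits the list: everything consumed satisfies Ws[i] ≤ c + i
theorem bAdv_split (c : Int) : ∀ (suf : List Int) (j : Nat),
    ∃ mid, suf = mid ++ (bAdv c suf j).1 ∧ (bAdv c suf j).2 = j + mid.length ∧
      ∀ i (h : i < mid.length), mid[i] ≤ c + (j : Int) + (i : Int) := by
  intro suf
  induction suf with
  | nil => intro j; exact ⟨[], by simp [bAdv], by simp [bAdv], by simp⟩
  | cons w ws ih =>
    intro j
    by_cases h : w ≤ c + (j : Int)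
    · have e : bAdv c (w :: ws) j = bAdv c ws (j + 1) := by simp [bAdv, h]
      obtain ⟨mid, h1, h2, h3⟩ := ih (j + 1)
      refine ⟨w :: mid, ?_, ?_, ?_⟩
      · rw [e]; simpa using h1
      · rw [e, h2]; simp [List.length_cons]; omega
      · intro i hi
        match i with
        | 0 => simpa using h
        | i + 1 =>
          have := h3 i (by simpa using hi)
          simp only [List.getElem_cons_succ]
          push_cast at this ⊢
          omega
    · have e : bAdv c (w :: ws) j = (w :: ws, j) := by simp [bAdv, h]
      exact ⟨[], by simp [e], by simp [e], by simp⟩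

-- the scan stops at the first unconsumed element, which is > c + j'
theorem bAdv_stop (c : Int) : ∀ (suf : List Int) (j : Nat),
    (bAdv c suf j).1 = [] ∨ ∃ w ws', (bAdv c suf j).1 = w :: ws' ∧ c + ((bAdv c suf j).2 : Int) < w := by
  intro suf
  induction suf with
  | nil => intro j; left; simp [bAdv]
  | cons w ws ih =>
    intro j
    by_cases h : w ≤ c + (j : Int)
    · have e : bAdv c (w :: ws) j = bAdv c ws (j + 1) := by simp [bAdv, h]
      rw [e]; exact ih (j + 1)
    · have e : bAdv c (w :: ws) j = (w :: ws, j) := by simp [bAdv, h]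
      right
      refine ⟨w, ws, by simp [e], ?_⟩
      rw [e]
      simpa using h

-- resumption: a consumed prefix stays consumed
theorem bAdv_append (c : Int) : ∀ (pre suf : List Int) (j : Nat),
    (∀ i (h : i < pre.length), pre[i] ≤ c + (j : Int) + (i : Int)) →
    bAdv c (pre ++ suf) j = bAdv c suf (j + pre.length) := by
  intro pre
  induction pre with
  | nil => intro suf j _; simp
  | cons p pre' ih =>
    intro suf j hp
    have h0 : p ≤ c + (j : Int) := by simpa using hp 0 (by simp)
    have e : bAdv c ((p :: pre') ++ suf) j = bAdv c (pre' ++ suf) (j + 1) := by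
      simp [bAdv, h0]
    rw [e, ih suf (j + 1) ?_]
    · congr 1; simp [List.length_cons]; omega
    · intro i hi
      have := hp (i + 1) (by simpa using hi)
      simp only [List.getElem_cons_succ] at this
      push_cast at this ⊢
      omega

theorem aShift_countP (Ws : List Int) (p : Int) :
    aShift Ws p = (Ws.countP (fun w => decide (w ≤ p)) : Int) := by
  unfold aShift
  rw [PySem.List.foldl_ite_add_one]
  simp

-- count characterisation of the scan result, on a sorted Ws
theorem cnt_at_fix (Ws : List Int) (hs : Ws.Pairwise (· ≤ ·)) (c : Int) :
    (Ws.countP (fun w => decide (w ≤ fIdx Ws c)) : Int) = (bAdv c Ws 0).2 := by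
  obtain ⟨mid, h1, h2, h3⟩ := bAdv_split c Ws 0
  have hstop := bAdv_stop c Ws 0
  have hJ : (bAdv c Ws 0).2 = mid.length := by omega
  have hmid : mid.countP (fun w => decide (w ≤ fIdx Ws c)) = mid.length := by
    rw [List.countP_eq_length]
    intro a ha
    obtain ⟨i, hi, rfl⟩ := List.mem_iff_getElem.mp ha
    have h3' := h3 i hi
    simp only [decide_eq_true_eq]
    have hrf : fIdx Ws c = c + ((bAdv c Ws 0).2 : Int) := rfl
    have hcast : (i : Int) < (mid.length : Int) := by exact_mod_cast hi
    omega
  have hrest : (bAdv c Ws 0).1.countP (fun w => decide (w ≤ fIdx Ws c)) = 0 := by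
    rcases hstop with hnil | ⟨w, ws', he, hlt⟩
    · simp [hnil]
    · rw [List.countP_eq_zero]
      intro a ha
      rw [he] at ha
      have hpw : ((bAdv c Ws 0).1).Pairwise (· ≤ ·) := by
        rw [h1] at hs
        exact (List.pairwise_append.mp hs).2.1
      rw [he] at hpw
      have hwa : w ≤ a := by
        rcases List.mem_cons.mp ha with rfl | ha'
        · exact le_refl a
        · exact (List.pairwise_cons.mp hpw).1 a ha'
      have hfa : fIdx Ws c < a := by
        have hrf : fIdx Ws c = c + ((bAdv c Ws 0).2 : Int) := rfl
        omega
      simp only [decide_eq_true_eq]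
      omega
  set r := (bAdv c Ws 0).1 with hr
  set J := (bAdv c Ws 0).2 with hJdef
  rw [hJ]
  generalize hgen : fIdx Ws c = t at hmid hrest ⊢
  rw [h1, List.countP_append, hmid, hrest]
  omega

theorem cnt_below_fix (Ws : List Int) (c : Int) (k : Nat) (hk : k < (bAdv c Ws 0).2) :
    k < Ws.countP (fun w => decide (w ≤ c + (k : Int))) := by
  obtain ⟨mid, h1, h2, h3⟩ := bAdv_split c Ws 0
  have hkm : k < mid.length := by omega
  have hsub : (mid.take (k + 1)).Sublist Ws := by
    rw [h1]
    exact ((mid.take_prefix (k + 1)).trans (mid.prefix_append _)).sublist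
  have hlen : (mid.take (k + 1)).length = k + 1 := by simp; omega
  have hall : (mid.take (k + 1)).countP (fun w => decide (w ≤ c + (k : Int)))
      = (mid.take (k + 1)).length := by
    rw [List.countP_eq_length]
    intro a ha
    obtain ⟨i, hi, rfl⟩ := List.mem_iff_getElem.mp ha
    rw [hlen] at hi
    have him : i < mid.length := by omega
    rw [List.getElem_take]
    have h3' := h3 i him
    simp only [decide_eq_true_eq]
    have hik : (i : Int) ≤ (k : Int) := by exact_mod_cast Nat.lt_succ_iff.mp hi
    omega
  have hle := hsub.countP_le (p := fun w => decide (w ≤ c + (k : Int)))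
  omega

theorem fIdx_strictMono (Ws : List Int) (hs : Ws.Pairwise (· ≤ ·)) {c c' : Int} (h : c < c') :
    fIdx Ws c < fIdx Ws c' := by
  by_contra hcon
  rw [not_lt] at hcon
  have hfc : fIdx Ws c = c + ((bAdv c Ws 0).2 : Int) := rfl
  have hfc' : fIdx Ws c' = c' + ((bAdv c' Ws 0).2 : Int) := rfl
  have hlt : (bAdv c' Ws 0).2 < (bAdv c Ws 0).2 := by
    rw [hfc, hfc'] at hcon
    omega
  have h1 := cnt_below_fix Ws c (bAdv c' Ws 0).2 hlt
  have h2 := cnt_at_fix Ws hs c'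
  have hmono : Ws.countP (fun w => decide (w ≤ c + ((bAdv c' Ws 0).2 : Int))) ≤
      Ws.countP (fun w => decide (w ≤ fIdx Ws c')) := by
    apply List.countP_mono_left
    intro x _ hx
    simp only [decide_eq_true_eq] at hx ⊢
    rw [hfc']
    omega
  omega

-- A's fixed-point iteration lands on fIdx
theorem aFix_eq (Ws : List Int) (hs : Ws.Pairwise (· ≤ ·)) (c : Int) :
    ∀ (fuel k : Nat), k ≤ (bAdv c Ws 0).2 → (bAdv c Ws 0).2 - k < fuel →
      aFix Ws c fuel (c + (k : Int)) = fIdx Ws c := by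
  intro fuel
  induction fuel with
  | zero => intro k _ h2; omega
  | succ fuel ih =>
    intro k hk hf
    have hsh : aShift Ws (c + (k : Int)) =
        ((Ws.countP (fun w => decide (w ≤ c + (k : Int)))) : Int) := aShift_countP Ws _
    by_cases hkJ : k = (bAdv c Ws 0).2
    · have hKJ : aShift Ws (c + (k : Int)) = (k : Int) := by
        rw [hsh, hkJ]
        have hca := cnt_at_fix Ws hs c
        have hf' : fIdx Ws c = c + ((bAdv c Ws 0).2 : Int) := rfl
        rw [hf'] at hca
        exact hca
      have hfix : c + aShift Ws (c + (k : Int)) = c + (k : Int) := by rw [hKJ]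
      have hfIdx : fIdx Ws c = c + ((bAdv c Ws 0).2 : Int) := rfl
      rw [hfIdx, ← hkJ]
      simp [aFix, hfix]
    · have hklt : k < (bAdv c Ws 0).2 := lt_of_le_of_ne hk hkJ
      have hKk := cnt_below_fix Ws c k hklt
      have hKJ : Ws.countP (fun w => decide (w ≤ c + (k : Int))) ≤ (bAdv c Ws 0).2 := by
        have hmono : Ws.countP (fun w => decide (w ≤ c + (k : Int))) ≤
            Ws.countP (fun w => decide (w ≤ fIdx Ws c)) := by
          apply List.countP_mono_left
          intro x _ hx
          simp only [decide_eq_true_eq] at hx ⊢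
          have hf' : fIdx Ws c = c + ((bAdv c Ws 0).2 : Int) := rfl
          rw [hf']
          omega
        have hca := cnt_at_fix Ws hs c
        omega
      have hne : c + aShift Ws (c + (k : Int)) ≠ c + (k : Int) := by rw [hsh]; omega
      simp only [aFix, if_neg hne]
      rw [hsh]
      exact ih _ hKJ (by omega)

theorem aFix_from_c (Ws : List Int) (hs : Ws.Pairwise (· ≤ ·)) (c : Int) :
    aFix Ws c (Ws.length + 1) c = fIdx Ws c := by
  obtain ⟨mid, h1, h2, _⟩ := bAdv_split c Ws 0
  have hlen : (bAdv c Ws 0).2 ≤ Ws.length := by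
    rw [h2, h1]
    simp
  have := aFix_eq Ws hs c (Ws.length + 1) 0 (by omega) (by omega)
  simpa using this

-- the filtered image both programs produce, per clean index
def condP (inW : List Int) (T_proc p : Int) : Bool := p < T_proc && !(inW.contains p)

def G (Ws inW : List Int) (T_proc : Int) (cs : List Int) : List Int :=
  (cs.map (fIdx Ws)).filter (condP inW T_proc)

-- A's accumulation loop builds the filtered image of the input list
theorem a_fold (Ws inW : List Int) (hs : Ws.Pairwise (· ≤ ·)) (T_proc : Int) :
    ∀ (cs out : List Int),
      cs.foldl (aStep Ws inW T_proc) out = out ++ G Ws inW T_proc cs := by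
  intro cs
  induction cs with
  | nil => intro out; simp [G]
  | cons c cs' ih =>
    intro out
    rw [List.foldl_cons]
    have hp : aFix Ws c (Ws.length + 1) c = fIdx Ws c := aFix_from_c Ws hs c
    simp only [aStep, hp]
    by_cases hc : (fIdx Ws c < T_proc && !(inW.contains (fIdx Ws c))) = true
    · rw [if_pos hc, ih]
      simp only [G, condP, List.map_cons, List.filter_cons]
      rw [if_pos hc]
      simp
    · rw [if_neg hc, ih]
      simp only [G, condP, List.map_cons, List.filter_cons]
      rw [if_neg hc]

-- B's loop invariant on the scan state
def ScanInv (Ws : List Int) (c : Int) (rest : List Int) (j : Nat) : Prop :=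
  ∃ pre, Ws = pre ++ rest ∧ j = pre.length ∧ ∀ i (h : i < pre.length), pre[i] ≤ c + (i : Int)

theorem bAdv_from_inv (Ws : List Int) {c : Int} {rest : List Int} {j : Nat}
    (hi : ScanInv Ws c rest j) : bAdv c rest j = bAdv c Ws 0 := by
  obtain ⟨pre, h1, h2, h3⟩ := hi
  rw [h1, bAdv_append c pre rest 0 ?_]
  · rw [h2]; congr 1; omega
  · intro i hi'
    have := h3 i hi'
    push_cast
    omega

theorem inv_step (Ws : List Int) {c : Int} {rest : List Int} {j : Nat}
    (hi : ScanInv Ws c rest j) :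
    ∀ c', c ≤ c' → ScanInv Ws c' (bAdv c rest j).1 (bAdv c rest j).2 := by
  intro c' hcc'
  obtain ⟨pre, h1, h2, h3⟩ := hi
  obtain ⟨mid, e1, e2, e3⟩ := bAdv_split c rest j
  refine ⟨pre ++ mid, ?_, ?_, ?_⟩
  · conv_lhs => rw [h1, e1]
    simp [List.append_assoc]
  · rw [e2, List.length_append, h2]
  · intro i hi'
    rw [List.length_append] at hi'
    by_cases hip : i < pre.length
    · rw [List.getElem_append_left hip]
      have := h3 i hip
      omega
    · rw [List.getElem_append_right (by omega)]
      have hlt : i - pre.length < mid.length := by omega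
      have he3 := e3 (i - pre.length) hlt
      have hcast : ((i - pre.length : Nat) : Int) = (i : Int) - (pre.length : Int) := by
        push_cast [Nat.cast_sub (by omega : pre.length ≤ i)]
        ring
      rw [hcast] at he3
      rw [h2] at he3
      omega

theorem b_fold (Ws inW : List Int) (T_proc : Int) :
    ∀ (cs rest out : List Int) (j : Nat), cs.Pairwise (· ≤ ·) →
      (∀ c ∈ cs, ScanInv Ws c rest j) →
      (cs.foldl (bStep inW T_proc) (rest, j, out)).2.2 = out ++ G Ws inW T_proc cs := by
  intro cs
  induction cs with
  | nil => intro rest out j _ _; simp [G]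
  | cons c cs' ih =>
    intro rest out j hpw hinvs
    have hinv := hinvs c List.mem_cons_self
    have hes := bAdv_from_inv Ws hinv
    rw [List.foldl_cons]
    have hb : bStep inW T_proc (rest, j, out) c =
        ((bAdv c Ws 0).1, (bAdv c Ws 0).2,
          if c + ((bAdv c Ws 0).2 : Int) < T_proc && !(inW.contains (c + ((bAdv c Ws 0).2 : Int)))
          then out ++ [c + ((bAdv c Ws 0).2 : Int)] else out) := by
      simp only [bStep, hes]
    rw [hb]
    rw [ih (bAdv c Ws 0).1
      (if c + ((bAdv c Ws 0).2 : Int) < T_proc && !(inW.contains (c + ((bAdv c Ws 0).2 : Int)))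
        then out ++ [c + ((bAdv c Ws 0).2 : Int)] else out)
      (bAdv c Ws 0).2 (List.pairwise_cons.mp hpw).2 ?_]
    · have hfx : fIdx Ws c = c + ((bAdv c Ws 0).2 : Int) := rfl
      by_cases hc : (c + ((bAdv c Ws 0).2 : Int) < T_proc && !(inW.contains (c + ((bAdv c Ws 0).2 : Int)))) = true
      · rw [if_pos hc]
        simp only [G, condP, List.map_cons, List.filter_cons, ← hfx] at hc ⊢
        rw [if_pos hc]
        simp
      · rw [if_neg hc]
        simp only [G, condP, List.map_cons, List.filter_cons, ← hfx] at hc ⊢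
        rw [if_neg hc]
    · intro c'' hc''
      have hcc'' : c ≤ c'' := (List.pairwise_cons.mp hpw).1 c'' hc''
      have hstep := inv_step Ws hinv c'' hcc''
      rw [hes] at hstep
      exact hstep

-- ===== VERDICT (by name: the statement is the Claim_ definition above) =====
theorem post_clean_to_proc_py_spec : Claim_equal_post_clean_to_proc_py := by
  intro pic W T _
  unfold Spec_post_clean_to_proc_py
  simp only [post_clean_to_proc_py, post_clean_to_proc_py_alt]
  set Ws := PySem.List.sorted W (fun x => x) with hWs
  set inW := PySem.Set.ofList Ws with hinW
  set cs := PySem.List.sorted (PySem.Set.ofList pic) (fun x => x) with hcs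
  have hs : Ws.Pairwise (· ≤ ·) := by
    have := PySem.List.sorted_pairwise (xs := W) (key := fun x => x)
    simpa [hWs] using this
  rw [a_fold Ws inW hs T pic [], b_fold Ws inW T cs Ws [] 0 ?_ ?_]
  · simp only [List.nil_append]
    have hcslt : cs.Pairwise (· < ·) := by
      have := PySem.List.sorted_ofList_pairwise_lt (xs := pic)
      simpa [hcs] using this
    have hmaplt : (cs.map (fIdx Ws)).Pairwise (· < ·) := by
      refine List.pairwise_map.mpr (hcslt.imp ?_)
      intro a b hab
      exact fIdx_strictMono Ws hs hab
    have hGlt : (G Ws inW T cs).Pairwise (· < ·) := hmaplt.filter _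
    apply PySem.List.sorted_eq_of_perm_of_pairwise_lt
    · have hnd1 : (G Ws inW T cs).Nodup := hGlt.imp (fun hab => by omega)
      have hnd2 : (PySem.Set.ofList (G Ws inW T pic)).Nodup := PySem.Set.nodup_ofList _
      apply (List.perm_ext_iff_of_nodup hnd1 hnd2).mpr
      intro a
      simp only [G, List.mem_filter, List.mem_map, PySem.Set.mem_ofList, hcs,
        PySem.List.mem_sorted]
    · simpa using hGlt
  · have := PySem.List.sorted_pairwise (xs := PySem.Set.ofList pic) (key := fun x => x)
    simpa [hcs] using this
  · intro c _
    exact ⟨[], rfl, rfl, by simp⟩
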